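-- pv_equiv track=rewrite | github.com/jiangq195/tanxin | starter_code1/NER/ner01.py | city_prov_ahead
-- ===== SOURCE A (Python) =====
-- def city_prov_ahead(seg, d_city_province):
--     city_prov_list = []
--     seg_list = []
--     for word in seg:
--         if word in d_city_province:
--             city_prov_list.append(word)
--         else:
--             seg_list.append(word)
--
--     return city_prov_list + seg_list
-- ===== SOURCE B (Python) =====
-- def city_prov_ahead(seg, d_city_province):
--     return sorted(seg, key=lambda w: w not in d_city_province)
-- ===== Notes on version B (the rewrite author's own statement) =====
-- stated objective: idiomatic
-- what changed: Replaces the explicit two-accumulator partition loop with a single stable sort keyed on dict membership (False sorts before True), which yields the same two ordered buckets concatenated.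
import Mathlib
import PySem

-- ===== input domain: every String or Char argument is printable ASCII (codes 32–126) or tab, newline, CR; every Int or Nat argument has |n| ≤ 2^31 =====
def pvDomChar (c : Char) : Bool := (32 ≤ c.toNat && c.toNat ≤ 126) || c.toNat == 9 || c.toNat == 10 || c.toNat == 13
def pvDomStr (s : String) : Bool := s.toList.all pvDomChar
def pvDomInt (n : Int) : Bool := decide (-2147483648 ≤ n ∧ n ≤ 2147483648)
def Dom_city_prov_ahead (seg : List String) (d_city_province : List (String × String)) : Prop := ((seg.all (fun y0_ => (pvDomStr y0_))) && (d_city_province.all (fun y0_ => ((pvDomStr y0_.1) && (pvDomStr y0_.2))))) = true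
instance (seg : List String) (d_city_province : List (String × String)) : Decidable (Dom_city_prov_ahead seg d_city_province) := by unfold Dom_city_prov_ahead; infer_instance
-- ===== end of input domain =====

-- B replaces A's two-accumulator partition loop by a single stable sort keyed on dict membership (same return value, no speed claim).


-- ===== PORT A =====
-- 'word in d_city_province' : dict membership = the word occurs among the keys
def pvInDict (d : List (String × String)) (w : String) : Bool := (d.map Prod.fst).contains w

def city_prov_ahead (seg : List String) (d_city_province : List (String × String)) : List String :=
  let st := seg.foldl (fun (st : List String × List String) word =>
    if pvInDict d_city_province word then (st.1 ++ [word], st.2) else (st.1, st.2 ++ [word]))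
    ([], [])
  st.1 ++ st.2

-- ===== PORT B =====
-- sorted(seg, key=lambda w: w not in d_city_province)  (False < True, ported as 0 < 1)
def city_prov_ahead_alt (seg : List String) (d_city_province : List (String × String)) : List String :=
  PySem.List.sorted seg (fun w => if pvInDict d_city_province w then (0 : Int) else 1) false

-- ===== PRECONDITION & SPEC =====
def Spec_city_prov_ahead (seg : List String) (d_city_province : List (String × String)) (out : List String) : Prop := out = city_prov_ahead_alt seg d_city_province
instance (seg : List String) (d_city_province : List (String × String)) (out : List String) : Decidable (Spec_city_prov_ahead seg d_city_province out) := by unfold Spec_city_prov_ahead; infer_instance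

-- ===== CLAIM (what is proved, stated in full; the proofs are below) =====
def Claim_equal_city_prov_ahead : Prop := ∀ (seg : List String) (d_city_province : List (String × String)), Dom_city_prov_ahead seg d_city_province → Spec_city_prov_ahead seg d_city_province (city_prov_ahead seg d_city_province)

-- ===== LEMMAS AND PROOFS =====

-- A's loop accumulates exactly the two membership filters.
theorem cityA_foldl {α : Type} (p : α → Bool) (xs : List α) (a b : List α) :
    xs.foldl (fun (st : List α × List α) w =>
      if p w then (st.1 ++ [w], st.2) else (st.1, st.2 ++ [w])) (a, b)
    = (a ++ xs.filter p, b ++ xs.filter (fun w => !p w)) := by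
  induction xs generalizing a b with
  | nil => simp
  | cons x xs ih =>
    by_cases h : p x = true <;>
      simp [List.foldl_cons, h, ih, List.append_assoc]

-- insertBy places x after a block it does not go before and in front of a block it goes before.
theorem insertBy_block {α : Type} (before : α → α → Bool) (x : α) (l0 l1 : List α)
    (h0 : ∀ y ∈ l0, before x y = false) (h1 : ∀ y ∈ l1, before x y = true) :
    PySem.List.insertBy before x (l0 ++ l1) = l0 ++ x :: l1 := by
  induction l0 with
  | nil =>
    cases l1 with
    | nil => simp [PySem.List.insertBy]
    | cons y ys => simp [PySem.List.insertBy, h1 y (by simp)]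
  | cons z l0 ih =>
    have hz : before x z = false := h0 z (by simp)
    simp only [List.cons_append, PySem.List.insertBy, hz]
    simp [ih (fun y hy => h0 y (by simp [hy]))]

-- The stable insertion-sort loop on a 0/1 indicator key maintains the two filtered blocks.
theorem sorted_indicator_loop {α : Type} (p : α → Bool) (xs l0 l1 : List α)
    (h0 : ∀ y ∈ l0, p y = true) (h1 : ∀ y ∈ l1, p y = false) :
    xs.foldl (fun acc x => PySem.List.insertBy
        (fun a b => decide ((if p a then (0 : Int) else 1) < (if p b then 0 else 1))) x acc)
      (l0 ++ l1)
    = (l0 ++ xs.filter p) ++ (l1 ++ xs.filter (fun w => !p w)) := by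
  induction xs generalizing l0 l1 with
  | nil => simp
  | cons x xs ih =>
    simp only [List.foldl_cons]
    by_cases hx : p x = true
    · have hins : PySem.List.insertBy
          (fun a b => decide ((if p a then (0 : Int) else 1) < (if p b then 0 else 1))) x (l0 ++ l1)
          = (l0 ++ [x]) ++ l1 := by
        rw [insertBy_block _ _ l0 l1
          (fun y hy => by simp [hx, h0 y hy])
          (fun y hy => by simp [hx, h1 y hy]), List.append_assoc]; rfl
      rw [hins, ih (l0 ++ [x]) l1
        (fun y hy => by rcases List.mem_append.1 hy with h | h; exact h0 y h; simp_all)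
        h1]
      simp [hx, List.append_assoc]
    · have hins : PySem.List.insertBy
          (fun a b => decide ((if p a then (0 : Int) else 1) < (if p b then 0 else 1))) x (l0 ++ l1)
          = l0 ++ (l1 ++ [x]) := by
        rw [← List.append_assoc]
        have := insertBy_block
          (fun a b => decide ((if p a then (0 : Int) else 1) < (if p b then 0 else 1))) x
          (l0 ++ l1) []
          (fun y hy => by by_cases hp : p y = true <;> simp [hx, hp]) (by simp)
        simpa using this
      rw [hins, ih l0 (l1 ++ [x]) h0
        (fun y hy => by rcases List.mem_append.1 hy with h | h; exact h1 y h; simp_all [Bool.not_eq_true] )]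
      simp [hx, List.append_assoc]

theorem sorted_indicator {α : Type} (p : α → Bool) (xs : List α) :
    PySem.List.sorted xs (fun x => if p x then (0 : Int) else 1) false
    = xs.filter p ++ xs.filter (fun w => !p w) := by
  have := sorted_indicator_loop p xs [] [] (by simp) (by simp)
  simpa [PySem.List.sorted] using this

-- ===== VERDICT (by name: the statement is the Claim_ definition above) =====
theorem city_prov_ahead_spec : Claim_equal_city_prov_ahead := by
  intro seg d _
  show city_prov_ahead seg d = city_prov_ahead_alt seg d
  rw [city_prov_ahead, city_prov_ahead_alt, cityA_foldl, sorted_indicator]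
  simp
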